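-- pv_equiv track=rewrite | github.com/SKaif009/ForbiddenHack | assets/path.py | char_encoding_variants
-- ===== SOURCE A (Python) =====
-- def char_encoding_variants(endpoint: str):
--     """Generate character encoding variations like /%61dmin /a%64min /ad%6Din etc. with upper/lower hex."""
--     variants = set()
--
--     # two hex maps: lowercase (%61) and uppercase (%41)
--     hex_maps = [
--         {c: f"%{ord(c):02x}" for c in set(endpoint)},  # lowercase hex
--         {c: f"%{ord(c):02X}" for c in set(endpoint)},  # uppercase hex
--     ]
--
--     for hex_map in hex_maps:
--         # encode one character at a time
--         for i in range(len(endpoint)):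
--             encoded = endpoint[:i] + hex_map.get(endpoint[i], endpoint[i]) + endpoint[i+1:]
--             variants.add("/" + encoded)
--
--         # encode two characters
--         for i in range(len(endpoint)):
--             for j in range(i+1, len(endpoint)):
--                 encoded = (
--                     endpoint[:i]
--                     + hex_map.get(endpoint[i], endpoint[i])
--                     + endpoint[i+1:j]
--                     + hex_map.get(endpoint[j], endpoint[j])
--                     + endpoint[j+1:]
--                 )
--                 variants.add("/" + encoded)
--
--         # fully encoded
--         fully_encoded = "".join(hex_map.get(c, c) for c in endpoint)
--         variants.add("/" + fully_encoded)
--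
--     return sorted(variants)
-- ===== SOURCE B (Python) =====
-- def _combos(n, k):
--     """All k-element ascending index lists drawn from range(n)."""
--     if k == 0:
--         return [[]]
--     if n < k:
--         return []
--     return _combos(n - 1, k) + [c + [n - 1] for c in _combos(n - 1, k - 1)]
--
--
-- def char_encoding_variants(endpoint: str):
--     """Generate character encoding variations like /%61dmin /a%64min /ad%6Din etc. with upper/lower hex."""
--     variants = set()
--     n = len(endpoint)
--     for fmt in ("02x", "02X"):
--         for k in (1, 2, n):
--             for combo in _combos(n, k):
--                 chosen = set(combo)
--                 encoded = "".join(
--                     "%" + format(ord(c), fmt) if i in chosen else c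
--                     for i, c in enumerate(endpoint)
--                 )
--                 variants.add("/" + encoded)
--     return sorted(variants)
-- ===== Notes on version B (the rewrite author's own statement) =====
-- stated objective: alternative
-- what changed: A's three separate generation passes (encode one char via slicing, encode two chars via a nested loop with slicing, encode all via a dict-lookup join) are collapsed into one loop over the count k of encoded positions, k in {1,2,n}, enumerating k-element index combinations and rebuilding each variant character-by-character; no hex_map dict is built at all.
import Mathlib
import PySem

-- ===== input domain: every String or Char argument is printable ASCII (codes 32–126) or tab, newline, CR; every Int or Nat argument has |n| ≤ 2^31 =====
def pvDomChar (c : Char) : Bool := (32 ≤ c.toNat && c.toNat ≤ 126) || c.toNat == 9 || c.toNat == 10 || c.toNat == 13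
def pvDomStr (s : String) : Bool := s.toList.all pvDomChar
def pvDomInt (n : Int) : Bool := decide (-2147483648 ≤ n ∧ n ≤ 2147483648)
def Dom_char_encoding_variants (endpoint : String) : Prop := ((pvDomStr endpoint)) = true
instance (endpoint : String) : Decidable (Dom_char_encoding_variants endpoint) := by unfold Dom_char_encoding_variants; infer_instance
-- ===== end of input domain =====

-- B replaces A's three separate generation passes (one-char, two-char, fully-encoded) by a single loop over the
-- number k of encoded positions, k ∈ {1, 2, n}, enumerating the k-element index combinations; alternative
-- decomposition, same cost; return values proved equal for every string.

-- ===== PORT A =====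
-- f"%{ord(c):02x}" / f"%{ord(c):02X}" hand-ported (no PySem hex primitive): exact for code points < 256,
-- which covers the whole ASCII input domain.
def pvHex2 (up : Bool) (n : Nat) : List Char :=
  let digs : List Char := if up then "0123456789ABCDEF".toList else "0123456789abcdef".toList
  [digs.getD (n / 16) '0', digs.getD (n % 16) '0']

-- {c: f"%{ord(c):02x}" for c in set(endpoint)} — the iteration over the set only fills a dict that is later
-- only LOOKED UP, so the (unmodelled) hash order cannot influence any result.
def pvHexMap (up : Bool) (cs : List Char) : PySem.Dict Char (List Char) :=
  (PySem.Set.ofList cs).foldl (fun d c => d.insert c ('%' :: pvHex2 up c.toNat)) PySem.Dict.empty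

def char_encoding_variants (endpoint : String) : List String :=
  let cs := endpoint.toList
  let n : Int := PySem.Str.len endpoint
  let variants : PySem.Set String :=
    [pvHexMap false cs, pvHexMap true cs].foldl (fun variants hm =>
      -- encode one character at a time
      let variants := (PySem.List.pyRange 0 n).foldl (fun v i =>
        PySem.Set.add v (String.mk ('/' :: (PySem.List.slice cs none (some i) ++
          hm.getD (PySem.List.pyGetD cs i ' ') [PySem.List.pyGetD cs i ' '] ++
          PySem.List.slice cs (some (i+1)) none)))) variants
      -- encode two characters
      let variants := (PySem.List.pyRange 0 n).foldl (fun v i =>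
        (PySem.List.pyRange (i+1) n).foldl (fun v j =>
          PySem.Set.add v (String.mk ('/' :: (PySem.List.slice cs none (some i) ++
            hm.getD (PySem.List.pyGetD cs i ' ') [PySem.List.pyGetD cs i ' '] ++
            PySem.List.slice cs (some (i+1)) (some j) ++
            hm.getD (PySem.List.pyGetD cs j ' ') [PySem.List.pyGetD cs j ' '] ++
            PySem.List.slice cs (some (j+1)) none)))) v) variants
      -- fully encoded
      PySem.Set.add variants (String.mk ('/' :: PySem.Chars.join [] (cs.map (fun c => hm.getD c [c])))))
      PySem.Set.empty
  PySem.List.sorted variants (fun x => x)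

-- ===== PORT B =====
-- _combos(n, k): all k-element ascending index lists drawn from range(n)
def pvCombos (n k : Nat) : List (List Nat) :=
  if k = 0 then [[]]
  else if n < k then []
  else pvCombos (n-1) k ++ (pvCombos (n-1) (k-1)).map (fun c => c ++ [n-1])
termination_by n
decreasing_by all_goals omega

-- "".join("%" + format(ord(c), fmt) if i in chosen else c for i, c in enumerate(endpoint)),
-- the format case carried as the Bool `up`
def pvRend (up : Bool) (chosen : PySem.Set Nat) (i : Nat) : List Char → List Char
  | [] => []
  | c :: rest => (if PySem.Set.contains chosen i then '%' :: pvHex2 up c.toNat else [c]) ++ pvRend up chosen (i+1) rest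

def char_encoding_variants_alt (endpoint : String) : List String :=
  let cs := endpoint.toList
  let n := cs.length
  let variants : PySem.Set String :=
    [false, true].foldl (fun v up =>
      [1, 2, n].foldl (fun v k =>
        (pvCombos n k).foldl (fun v combo =>
          PySem.Set.add v (String.mk ('/' :: pvRend up (PySem.Set.ofList combo) 0 cs))) v) v)
      PySem.Set.empty
  PySem.List.sorted variants (fun x => x)

-- ===== PRECONDITION & SPEC =====
def Spec_char_encoding_variants (endpoint : String) (out : List String) : Prop := out = char_encoding_variants_alt endpoint
instance (endpoint : String) (out : List String) : Decidable (Spec_char_encoding_variants endpoint out) := by unfold Spec_char_encoding_variants; infer_instance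

-- ===== CLAIM (what is proved, stated in full; the proofs are below) =====
def Claim_equal_char_encoding_variants : Prop := ∀ (endpoint : String), Dom_char_encoding_variants endpoint → Spec_char_encoding_variants endpoint (char_encoding_variants endpoint)

-- ===== LEMMAS AND PROOFS =====

-- proof-side names for the two variant sets (definitionally the sets the ports sort)
def pvVarA (endpoint : String) : PySem.Set String :=
  [pvHexMap false endpoint.toList, pvHexMap true endpoint.toList].foldl (fun variants hm =>
    PySem.Set.add
      ((PySem.List.pyRange 0 (PySem.Str.len endpoint)).foldl (fun v i =>
        (PySem.List.pyRange (i+1) (PySem.Str.len endpoint)).foldl (fun v j =>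
          PySem.Set.add v (String.mk ('/' :: (PySem.List.slice endpoint.toList none (some i) ++
            hm.getD (PySem.List.pyGetD endpoint.toList i ' ') [PySem.List.pyGetD endpoint.toList i ' '] ++
            PySem.List.slice endpoint.toList (some (i+1)) (some j) ++
            hm.getD (PySem.List.pyGetD endpoint.toList j ' ') [PySem.List.pyGetD endpoint.toList j ' '] ++
            PySem.List.slice endpoint.toList (some (j+1)) none)))) v)
        ((PySem.List.pyRange 0 (PySem.Str.len endpoint)).foldl (fun v i =>
          PySem.Set.add v (String.mk ('/' :: (PySem.List.slice endpoint.toList none (some i) ++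
            hm.getD (PySem.List.pyGetD endpoint.toList i ' ') [PySem.List.pyGetD endpoint.toList i ' '] ++
            PySem.List.slice endpoint.toList (some (i+1)) none)))) variants))
      (String.mk ('/' :: PySem.Chars.join [] (endpoint.toList.map (fun c => hm.getD c [c])))))
    PySem.Set.empty

def pvVarB (endpoint : String) : PySem.Set String :=
  [false, true].foldl (fun v up =>
    [1, 2, endpoint.toList.length].foldl (fun v k =>
      (pvCombos endpoint.toList.length k).foldl (fun v combo =>
        PySem.Set.add v (String.mk ('/' :: pvRend up (PySem.Set.ofList combo) 0 endpoint.toList))) v) v)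
    PySem.Set.empty

theorem pvA_eq (endpoint : String) :
    char_encoding_variants endpoint = PySem.List.sorted (pvVarA endpoint) (fun x => x) := rfl

theorem pvB_eq (endpoint : String) :
    char_encoding_variants_alt endpoint = PySem.List.sorted (pvVarB endpoint) (fun x => x) := rfl

-- the encoded form of one character
def pvEnc (up : Bool) (c : Char) : List Char := '%' :: pvHex2 up c.toNat

-- the three string shapes both programs generate (for one hex case `up`)
def pvSing (up : Bool) (cs : List Char) (i : Nat) : String :=
  String.mk ('/' :: (cs.take i ++ pvEnc up (cs.getD i ' ') ++ cs.drop (i+1)))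
def pvPair (up : Bool) (cs : List Char) (i j : Nat) : String :=
  String.mk ('/' :: (cs.take i ++ pvEnc up (cs.getD i ' ') ++ (cs.drop (i+1)).take (j-(i+1)) ++
    pvEnc up (cs.getD j ' ') ++ cs.drop (j+1)))
def pvFull (up : Bool) (cs : List Char) : String :=
  String.mk ('/' :: (cs.map (pvEnc up)).flatten)

-- what one hex case contributes, as a predicate on the generated string
def pvGen (up : Bool) (cs : List Char) (v : String) : Prop :=
  (∃ i : Nat, i < cs.length ∧ v = pvSing up cs i) ∨
  (∃ i j : Nat, i < j ∧ j < cs.length ∧ v = pvPair up cs i j) ∨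
  v = pvFull up cs

-- membership through a fold of Set.add
theorem pv_mem_foldl_add {α β : Type} [BEq α] [LawfulBEq α] (l : List β) (f : β → α) (s : PySem.Set α) (v : α) :
    v ∈ l.foldl (fun s x => PySem.Set.add s (f x)) s ↔ v ∈ s ∨ ∃ x ∈ l, v = f x := by
  induction l generalizing s with
  | nil => simp
  | cons a t ih =>
    simp only [List.foldl_cons, ih, PySem.Set.mem_add, List.mem_cons]
    constructor
    · rintro (((h|h)|⟨x,hx,rfl⟩))
      · exact Or.inl h
      · exact Or.inr ⟨a, Or.inl rfl, h⟩
      · exact Or.inr ⟨x, Or.inr hx, rfl⟩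
    · rintro (h|⟨x,(rfl|hx),rfl⟩)
      · exact Or.inl (Or.inl h)
      · exact Or.inl (Or.inr rfl)
      · exact Or.inr ⟨x, hx, rfl⟩

-- nested version, for A's two-character double loop
theorem pv_mem_foldl_add2 {α β γ : Type} [BEq α] [LawfulBEq α] (l : List β) (g : β → List γ)
    (f : β → γ → α) (s : PySem.Set α) (v : α) :
    v ∈ l.foldl (fun s i => (g i).foldl (fun s j => PySem.Set.add s (f i j)) s) s ↔
      v ∈ s ∨ ∃ i ∈ l, ∃ j ∈ g i, v = f i j := by
  induction l generalizing s with
  | nil => simp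
  | cons a t ih =>
    simp only [List.foldl_cons, ih, pv_mem_foldl_add, List.mem_cons]
    constructor
    · rintro (((h|⟨j,hj,rfl⟩)|⟨i,hi,j,hj,rfl⟩))
      · exact Or.inl h
      · exact Or.inr ⟨a, Or.inl rfl, j, hj, rfl⟩
      · exact Or.inr ⟨i, Or.inr hi, j, hj, rfl⟩
    · rintro (h|⟨i,(rfl|hi),j,hj,rfl⟩)
      · exact Or.inl (Or.inl h)
      · exact Or.inl (Or.inr ⟨j, hj, rfl⟩)
      · exact Or.inr ⟨i, hi, j, hj, rfl⟩

-- a fold whose step preserves Nodup preserves Nodup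
theorem pv_nodup_foldl {α β : Type} (l : List β) (g : List α → β → List α)
    (h : ∀ s x, s.Nodup → (g s x).Nodup) (s : List α) (hs : s.Nodup) : (l.foldl g s).Nodup := by
  induction l generalizing s with
  | nil => exact hs
  | cons a t ih => exact ih _ (h _ _ hs)

-- the hex-map dict returns the encoded character on members of cs
theorem pv_getD_foldl_insert_key {κ ν : Type} [DecidableEq κ] [BEq κ] [LawfulBEq κ]
    (l : List κ) (f : κ → ν) (d : PySem.Dict κ ν) (c : κ) (d0 : ν) :
    (l.foldl (fun d c => d.insert c (f c)) d).getD c d0 = if c ∈ l then f c else d.getD c d0 := by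
  induction l generalizing d with
  | nil => simp
  | cons a t ih =>
    simp only [List.foldl_cons, ih, PySem.Dict.getD_insert, List.mem_cons]
    by_cases hct : c ∈ t <;> by_cases hca : c = a <;> simp [hct, hca]

theorem pv_hexMap_getD (up : Bool) (cs : List Char) (c : Char) (hc : c ∈ cs) (d0 : List Char) :
    (pvHexMap up cs).getD c d0 = pvEnc up c := by
  unfold pvHexMap
  rw [pv_getD_foldl_insert_key]
  rw [if_pos ((PySem.Set.mem_ofList cs c).mpr hc)]
  rfl

-- Chars.join with the empty separator is flatten
theorem pv_join_nil (parts : List (List Char)) : PySem.Chars.join [] parts = parts.flatten := by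
  show ([]:List Char).intercalate parts = parts.flatten
  induction parts with
  | nil => rfl
  | cons p t ih =>
    cases t with
    | nil => simp [List.intercalate]
    | cons q u =>
      simp only [List.intercalate, List.intersperse] at *
      simp_all

-- ---- pvRend structure lemmas ----
theorem pv_rend_append (up : Bool) (S : PySem.Set Nat) (off : Nat) (xs ys : List Char) :
    pvRend up S off (xs ++ ys) = pvRend up S off xs ++ pvRend up S (off + xs.length) ys := by
  induction xs generalizing off with
  | nil => simp [pvRend]
  | cons c t ih =>
    simp only [List.cons_append, pvRend, ih, List.length_cons, List.append_assoc]
    rw [show off + (t.length + 1) = off + 1 + t.length by omega]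

theorem pv_rend_none (up : Bool) (S : PySem.Set Nat) (off : Nat) (cs : List Char)
    (h : ∀ t, off ≤ t → t < off + cs.length → t ∉ S) : pvRend up S off cs = cs := by
  induction cs generalizing off with
  | nil => rfl
  | cons c t ih =>
    have hoff : off ∉ S := h off le_rfl (by simp)
    have hc : PySem.Set.contains S off = false := by
      rcases Bool.eq_false_or_eq_true (PySem.Set.contains S off) with h' | h'
      · exact absurd ((PySem.Set.contains_iff S off).mp h') hoff
      · exact h'
    simp only [pvRend, hc, Bool.false_eq_true, if_false]
    rw [ih (off+1) (fun u hu1 hu2 => h u (by omega) (by simp only [List.length_cons]; omega))]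
    simp

theorem pv_rend_all (up : Bool) (S : PySem.Set Nat) (off : Nat) (cs : List Char)
    (h : ∀ t, off ≤ t → t < off + cs.length → t ∈ S) : pvRend up S off cs = (cs.map (pvEnc up)).flatten := by
  induction cs generalizing off with
  | nil => rfl
  | cons c t ih =>
    have hoff : off ∈ S := h off le_rfl (by simp)
    have hc : PySem.Set.contains S off = true := (PySem.Set.contains_iff S off).mpr hoff
    simp only [pvRend, hc, if_true]
    rw [ih (off+1) (fun u hu1 hu2 => h u (by omega) (by simp only [List.length_cons]; omega))]
    simp [pvEnc]

-- ---- pvCombos characterisations ----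
theorem pv_combos_zero (n : Nat) : pvCombos n 0 = [[]] := by unfold pvCombos; simp

theorem pv_combos_of_lt (n k : Nat) (h : n < k) : pvCombos n k = [] := by
  unfold pvCombos
  have hk : k ≠ 0 := by omega
  simp [hk, h]

theorem pv_combos_one (n : Nat) : pvCombos n 1 = (List.range n).map (fun i => [i]) := by
  induction n with
  | zero => rw [pv_combos_of_lt 0 1 (by omega)]; simp
  | succ m ih =>
    rw [pvCombos]
    simp [ih, pv_combos_zero, List.range_succ]

theorem pv_combos_self (n : Nat) : pvCombos n n = [List.range n] := by
  induction n with
  | zero => rw [pv_combos_zero]; simp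
  | succ m ih =>
    rw [pvCombos]
    simp [pv_combos_of_lt m (m+1) (by omega), ih, List.range_succ]

theorem pv_mem_combos_two (n : Nat) (c : List Nat) :
    c ∈ pvCombos n 2 ↔ ∃ i j : Nat, i < j ∧ j < n ∧ c = [i, j] := by
  induction n with
  | zero =>
    rw [pv_combos_of_lt 0 2 (by omega)]
    constructor
    · intro h; simp at h
    · rintro ⟨i, j, hij, hj, rfl⟩; omega
  | succ m ih =>
    rw [pvCombos]
    simp only [if_neg (by omega : ¬(2:Nat) = 0)]
    by_cases hm : m + 1 < 2
    · rw [if_pos hm]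
      constructor
      · intro h; simp at h
      · rintro ⟨i, j, hij, hj, rfl⟩; omega
    · rw [if_neg hm]
      rw [show m + 1 - 1 = m from rfl, show (2:Nat) - 1 = 1 from rfl, pv_combos_one]
      constructor
      · intro h
        rcases List.mem_append.mp h with h | h
        · rcases ih.mp h with ⟨i, j, hij, hj, rfl⟩
          exact ⟨i, j, hij, by omega, rfl⟩
        · rcases List.mem_map.mp h with ⟨c', hc', rfl⟩
          rcases List.mem_map.mp hc' with ⟨i, hi, rfl⟩
          exact ⟨i, m, List.mem_range.mp hi, by omega, rfl⟩
      · rintro ⟨i, j, hij, hj, rfl⟩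
        by_cases hjm : j < m
        · exact List.mem_append.mpr (Or.inl (ih.mpr ⟨i, j, hij, hjm, rfl⟩))
        · have hje : j = m := by omega
          subst hje
          exact List.mem_append.mpr (Or.inr (List.mem_map.mpr
            ⟨[i], List.mem_map.mpr ⟨i, List.mem_range.mpr (by omega), rfl⟩, rfl⟩))

-- ---- the rendered string for each combo shape ----
theorem pv_rend_sing (up : Bool) (cs : List Char) (i : Nat) (hi : i < cs.length) :
    pvRend up (PySem.Set.ofList [i]) 0 cs = cs.take i ++ pvEnc up (cs.getD i ' ') ++ cs.drop (i+1) := by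
  have hmem : ∀ t : Nat, t ∈ PySem.Set.ofList [i] ↔ t = i := by
    intro t; rw [PySem.Set.mem_ofList]; simp
  conv_lhs => rw [← List.take_append_drop i cs, List.drop_eq_getElem_cons hi]
  rw [pv_rend_append]
  rw [pv_rend_none _ _ _ _ (by intro t h1 h2; rw [hmem]; simp only [List.length_take] at h2; omega)]
  have hlen : (cs.take i).length = i := by simp; omega
  rw [hlen]
  simp only [Nat.zero_add, pvRend]
  rw [show PySem.Set.contains (PySem.Set.ofList [i]) i = true from
    (PySem.Set.contains_iff _ _).mpr ((hmem i).mpr rfl)]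
  rw [pv_rend_none _ _ _ _ (by intro t h1 h2; rw [hmem]; omega)]
  simp [pvEnc, List.getElem?_eq_getElem hi]

theorem pv_rend_pair (up : Bool) (cs : List Char) (i j : Nat) (hij : i < j) (hj : j < cs.length) :
    pvRend up (PySem.Set.ofList [i, j]) 0 cs =
      cs.take i ++ pvEnc up (cs.getD i ' ') ++ (cs.drop (i+1)).take (j-(i+1)) ++
        pvEnc up (cs.getD j ' ') ++ cs.drop (j+1) := by
  have hmem : ∀ t : Nat, t ∈ PySem.Set.ofList [i, j] ↔ t = i ∨ t = j := by
    intro t; rw [PySem.Set.mem_ofList]; simp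
  have hi : i < cs.length := by omega
  have hsplit2 : cs.drop (i+1) = (cs.drop (i+1)).take (j-(i+1)) ++ (cs[j] :: cs.drop (j+1)) := by
    conv_lhs => rw [← List.take_append_drop (j-(i+1)) (cs.drop (i+1))]
    congr 1
    rw [List.drop_drop]
    rw [show i + 1 + (j - (i+1)) = j by omega]
    exact List.drop_eq_getElem_cons hj
  conv_lhs => rw [← List.take_append_drop i cs, List.drop_eq_getElem_cons hi, hsplit2]
  rw [pv_rend_append]
  rw [pv_rend_none _ _ _ _ (by intro t h1 h2; rw [hmem]; simp only [List.length_take] at h2; omega)]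
  have hlen : (cs.take i).length = i := by simp; omega
  rw [hlen]
  simp only [Nat.zero_add, pvRend]
  rw [show PySem.Set.contains (PySem.Set.ofList [i, j]) i = true from
    (PySem.Set.contains_iff _ _).mpr ((hmem i).mpr (Or.inl rfl))]
  rw [pv_rend_append]
  rw [pv_rend_none _ _ _ _ (by
    intro t h1 h2
    rw [hmem]
    simp only [List.length_take, List.length_drop] at h2
    omega)]
  rw [show i + 1 + ((cs.drop (i+1)).take (j-(i+1))).length = j by
    simp only [List.length_take, List.length_drop]; omega]
  simp only [pvRend]
  rw [show PySem.Set.contains (PySem.Set.ofList [i, j]) j = true from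
    (PySem.Set.contains_iff _ _).mpr ((hmem j).mpr (Or.inr rfl))]
  rw [pv_rend_none _ _ _ _ (by intro t h1 h2; rw [hmem]; omega)]
  simp [pvEnc, List.getElem?_eq_getElem hi, List.getElem?_eq_getElem hj]

theorem pv_rend_full (up : Bool) (cs : List Char) :
    pvRend up (PySem.Set.ofList (List.range cs.length)) 0 cs = (cs.map (pvEnc up)).flatten := by
  apply pv_rend_all
  intro t h1 h2
  rw [PySem.Set.mem_ofList, List.mem_range]
  omega

-- ---- the strings A's three phases generate, in terms of pvSing/pvPair/pvFull ----
theorem pv_getD_mem (cs : List Char) (k : Nat) (hk : k < cs.length) : cs.getD k ' ' ∈ cs := by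
  rw [List.getD_eq_getElem _ _ hk]
  exact List.getElem_mem hk

theorem pv_strA1 (up : Bool) (cs : List Char) (k : Nat) (hk : k < cs.length) :
    String.mk ('/' :: (PySem.List.slice cs none (some (k:Int)) ++
      (pvHexMap up cs).getD (PySem.List.pyGetD cs (k:Int) ' ') [PySem.List.pyGetD cs (k:Int) ' '] ++
      PySem.List.slice cs (some ((k:Int)+1)) none)) = pvSing up cs k := by
  have h1 : PySem.List.slice cs none (some (k:Int)) = cs.take k := by
    rw [PySem.List.slice_to cs (by positivity)]; simp
  have h3 : PySem.List.slice cs (some ((k:Int)+1)) none = cs.drop (k+1) := by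
    rw [show ((k:Int)+1) = ((k+1 : Nat) : Int) by push_cast; ring,
      PySem.List.slice_from cs (by positivity)]
    simp
  have h4 : PySem.List.pyGetD cs (k:Int) ' ' = cs.getD k ' ' := by simp
  rw [pvSing, h1, h3, h4, pv_hexMap_getD up cs _ (pv_getD_mem cs k hk)]

theorem pv_strA2 (up : Bool) (cs : List Char) (k l : Nat) (hkl : k < l) (hl : l < cs.length) :
    String.mk ('/' :: (PySem.List.slice cs none (some (k:Int)) ++
      (pvHexMap up cs).getD (PySem.List.pyGetD cs (k:Int) ' ') [PySem.List.pyGetD cs (k:Int) ' '] ++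
      PySem.List.slice cs (some ((k:Int)+1)) (some (l:Int)) ++
      (pvHexMap up cs).getD (PySem.List.pyGetD cs (l:Int) ' ') [PySem.List.pyGetD cs (l:Int) ' '] ++
      PySem.List.slice cs (some ((l:Int)+1)) none)) = pvPair up cs k l := by
  have hk : k < cs.length := by omega
  have h1 : PySem.List.slice cs none (some (k:Int)) = cs.take k := by
    rw [PySem.List.slice_to cs (by positivity)]; simp
  have h2 : PySem.List.slice cs (some ((k:Int)+1)) (some (l:Int)) = (cs.drop (k+1)).take (l-(k+1)) := by
    rw [show ((k:Int)+1) = ((k+1 : Nat) : Int) by push_cast; ring, PySem.List.slice_natCast]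
  have h3 : PySem.List.slice cs (some ((l:Int)+1)) none = cs.drop (l+1) := by
    rw [show ((l:Int)+1) = ((l+1 : Nat) : Int) by push_cast; ring,
      PySem.List.slice_from cs (by positivity)]
    simp
  have h4 : PySem.List.pyGetD cs (k:Int) ' ' = cs.getD k ' ' := by simp
  have h5 : PySem.List.pyGetD cs (l:Int) ' ' = cs.getD l ' ' := by simp
  rw [pvPair, h1, h2, h3, h4, h5, pv_hexMap_getD up cs _ (pv_getD_mem cs k hk),
    pv_hexMap_getD up cs _ (pv_getD_mem cs l hl)]

theorem pv_strA3 (up : Bool) (cs : List Char) :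
    String.mk ('/' :: PySem.Chars.join [] (cs.map (fun c => (pvHexMap up cs).getD c [c]))) = pvFull up cs := by
  rw [pvFull, pv_join_nil, List.map_congr_left (fun c hc => pv_hexMap_getD up cs c hc [c])]

-- ---- membership characterisations of the two variant sets ----
theorem pv_phase1 (up : Bool) (endpoint : String) (v : String) :
    (∃ i ∈ PySem.List.pyRange 0 (PySem.Str.len endpoint),
      v = String.mk ('/' :: (PySem.List.slice endpoint.toList none (some i) ++
        (pvHexMap up endpoint.toList).getD (PySem.List.pyGetD endpoint.toList i ' ')
          [PySem.List.pyGetD endpoint.toList i ' '] ++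
        PySem.List.slice endpoint.toList (some (i+1)) none))) ↔
    (∃ k : Nat, k < endpoint.toList.length ∧ v = pvSing up endpoint.toList k) := by
  rw [PySem.Str.len_eq, PySem.List.pyRange_zero_natCast]
  constructor
  · rintro ⟨i, hi, rfl⟩
    rcases List.mem_map.mp hi with ⟨k, hk, rfl⟩
    have hk' := List.mem_range.mp hk
    exact ⟨k, hk', pv_strA1 up _ k hk'⟩
  · rintro ⟨k, hk, rfl⟩
    exact ⟨(k:Int), List.mem_map.mpr ⟨k, List.mem_range.mpr hk, rfl⟩, (pv_strA1 up _ k hk).symm⟩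

theorem pv_phase2 (up : Bool) (endpoint : String) (v : String) :
    (∃ i ∈ PySem.List.pyRange 0 (PySem.Str.len endpoint),
      ∃ j ∈ PySem.List.pyRange (i+1) (PySem.Str.len endpoint),
      v = String.mk ('/' :: (PySem.List.slice endpoint.toList none (some i) ++
        (pvHexMap up endpoint.toList).getD (PySem.List.pyGetD endpoint.toList i ' ')
          [PySem.List.pyGetD endpoint.toList i ' '] ++
        PySem.List.slice endpoint.toList (some (i+1)) (some j) ++
        (pvHexMap up endpoint.toList).getD (PySem.List.pyGetD endpoint.toList j ' ')
          [PySem.List.pyGetD endpoint.toList j ' '] ++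
        PySem.List.slice endpoint.toList (some (j+1)) none))) ↔
    (∃ k l : Nat, k < l ∧ l < endpoint.toList.length ∧ v = pvPair up endpoint.toList k l) := by
  rw [PySem.Str.len_eq, PySem.List.pyRange_zero_natCast]
  constructor
  · rintro ⟨i, hi, j, hj, rfl⟩
    rcases List.mem_map.mp hi with ⟨k, hk, rfl⟩
    have hk' := List.mem_range.mp hk
    have hj' := PySem.List.mem_pyRange_one.mp hj
    obtain ⟨l, rfl⟩ : ∃ l : Nat, j = (l : Int) := ⟨j.toNat, (Int.toNat_of_nonneg (by omega)).symm⟩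
    refine ⟨k, l, by omega, by omega, pv_strA2 up _ k l (by omega) (by omega)⟩
  · rintro ⟨k, l, hkl, hl, rfl⟩
    exact ⟨(k:Int), List.mem_map.mpr ⟨k, List.mem_range.mpr (by omega), rfl⟩,
      (l:Int), PySem.List.mem_pyRange_one.mpr ⟨by omega, by omega⟩,
      (pv_strA2 up _ k l hkl hl).symm⟩

theorem pv_genB1 (up : Bool) (endpoint : String) (v : String) :
    (∃ combo ∈ pvCombos endpoint.toList.length 1,
      v = String.mk ('/' :: pvRend up (PySem.Set.ofList combo) 0 endpoint.toList)) ↔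
    (∃ i : Nat, i < endpoint.toList.length ∧ v = pvSing up endpoint.toList i) := by
  rw [pv_combos_one]
  constructor
  · rintro ⟨combo, hc, rfl⟩
    rcases List.mem_map.mp hc with ⟨i, hi, rfl⟩
    have hi' := List.mem_range.mp hi
    exact ⟨i, hi', by rw [pvSing, pv_rend_sing up _ i hi']⟩
  · rintro ⟨i, hi, rfl⟩
    exact ⟨[i], List.mem_map.mpr ⟨i, List.mem_range.mpr hi, rfl⟩,
      by rw [pvSing, pv_rend_sing up _ i hi]⟩

theorem pv_genB2 (up : Bool) (endpoint : String) (v : String) :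
    (∃ combo ∈ pvCombos endpoint.toList.length 2,
      v = String.mk ('/' :: pvRend up (PySem.Set.ofList combo) 0 endpoint.toList)) ↔
    (∃ i j : Nat, i < j ∧ j < endpoint.toList.length ∧ v = pvPair up endpoint.toList i j) := by
  constructor
  · rintro ⟨combo, hc, rfl⟩
    rcases (pv_mem_combos_two _ _).mp hc with ⟨i, j, hij, hj, rfl⟩
    exact ⟨i, j, hij, hj, by rw [pvPair, pv_rend_pair up _ i j hij hj]⟩
  · rintro ⟨i, j, hij, hj, rfl⟩
    exact ⟨[i, j], (pv_mem_combos_two _ _).mpr ⟨i, j, hij, hj, rfl⟩,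
      by rw [pvPair, pv_rend_pair up _ i j hij hj]⟩

theorem pv_genBn (up : Bool) (endpoint : String) (v : String) :
    (∃ combo ∈ pvCombos endpoint.toList.length endpoint.toList.length,
      v = String.mk ('/' :: pvRend up (PySem.Set.ofList combo) 0 endpoint.toList)) ↔
    v = pvFull up endpoint.toList := by
  rw [pv_combos_self]
  constructor
  · rintro ⟨combo, hc, rfl⟩
    rw [List.mem_singleton] at hc
    subst hc
    rw [pvFull, pv_rend_full]
  · rintro rfl
    exact ⟨List.range endpoint.toList.length, List.mem_singleton.mpr rfl,
      by rw [pvFull, pv_rend_full]⟩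

theorem pv_memA (endpoint : String) (v : String) :
    v ∈ pvVarA endpoint ↔ pvGen false endpoint.toList v ∨ pvGen true endpoint.toList v := by
  unfold pvVarA
  simp only [List.foldl_cons, List.foldl_nil]
  rw [PySem.Set.mem_add]
  rw [pv_mem_foldl_add2]
  rw [pv_mem_foldl_add]
  rw [PySem.Set.mem_add]
  rw [pv_mem_foldl_add2]
  rw [pv_mem_foldl_add]
  constructor
  · rintro ((((((h | h) | h) | h) | h) | h) | h)
    · simp [PySem.Set.empty] at h
    · exact Or.inl (Or.inl ((pv_phase1 false endpoint v).mp h))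
    · exact Or.inl (Or.inr (Or.inl ((pv_phase2 false endpoint v).mp h)))
    · exact Or.inl (Or.inr (Or.inr (h.trans (pv_strA3 false endpoint.toList))))
    · exact Or.inr (Or.inl ((pv_phase1 true endpoint v).mp h))
    · exact Or.inr (Or.inr (Or.inl ((pv_phase2 true endpoint v).mp h)))
    · exact Or.inr (Or.inr (Or.inr (h.trans (pv_strA3 true endpoint.toList))))
  · rintro (g | g) <;> rcases g with h | h | h
    · exact Or.inl (Or.inl (Or.inl (Or.inl (Or.inl (Or.inr ((pv_phase1 false endpoint v).mpr h))))))
    · exact Or.inl (Or.inl (Or.inl (Or.inl (Or.inr ((pv_phase2 false endpoint v).mpr h)))))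
    · exact Or.inl (Or.inl (Or.inl (Or.inr (h.trans (pv_strA3 false endpoint.toList).symm))))
    · exact Or.inl (Or.inl (Or.inr ((pv_phase1 true endpoint v).mpr h)))
    · exact Or.inl (Or.inr ((pv_phase2 true endpoint v).mpr h))
    · exact Or.inr (h.trans (pv_strA3 true endpoint.toList).symm)

theorem pv_memB (endpoint : String) (v : String) :
    v ∈ pvVarB endpoint ↔ pvGen false endpoint.toList v ∨ pvGen true endpoint.toList v := by
  unfold pvVarB
  simp only [List.foldl_cons, List.foldl_nil]
  rw [pv_mem_foldl_add]
  rw [pv_mem_foldl_add]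
  rw [pv_mem_foldl_add]
  rw [pv_mem_foldl_add]
  rw [pv_mem_foldl_add]
  rw [pv_mem_foldl_add]
  constructor
  · rintro ((((((h | h) | h) | h) | h) | h) | h)
    · simp [PySem.Set.empty] at h
    · exact Or.inl (Or.inl ((pv_genB1 false endpoint v).mp h))
    · exact Or.inl (Or.inr (Or.inl ((pv_genB2 false endpoint v).mp h)))
    · exact Or.inl (Or.inr (Or.inr ((pv_genBn false endpoint v).mp h)))
    · exact Or.inr (Or.inl ((pv_genB1 true endpoint v).mp h))
    · exact Or.inr (Or.inr (Or.inl ((pv_genB2 true endpoint v).mp h)))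
    · exact Or.inr (Or.inr (Or.inr ((pv_genBn true endpoint v).mp h)))
  · rintro (g | g) <;> rcases g with h | h | h
    · exact Or.inl (Or.inl (Or.inl (Or.inl (Or.inl (Or.inr ((pv_genB1 false endpoint v).mpr h))))))
    · exact Or.inl (Or.inl (Or.inl (Or.inl (Or.inr ((pv_genB2 false endpoint v).mpr h)))))
    · exact Or.inl (Or.inl (Or.inl (Or.inr ((pv_genBn false endpoint v).mpr h))))
    · exact Or.inl (Or.inl (Or.inr ((pv_genB1 true endpoint v).mpr h)))
    · exact Or.inl (Or.inr ((pv_genB2 true endpoint v).mpr h))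
    · exact Or.inr ((pv_genBn true endpoint v).mpr h)

theorem pv_nodupA (endpoint : String) : (pvVarA endpoint).Nodup := by
  unfold pvVarA
  apply pv_nodup_foldl _ _ _ _ List.nodup_nil
  intro s x hs
  apply PySem.Set.nodup_add
  apply pv_nodup_foldl _ _ _ _ ?_
  · intro s' i hs'
    apply pv_nodup_foldl _ _ _ _ hs'
    intro s'' j hs''
    exact PySem.Set.nodup_add _ _ hs''
  · apply pv_nodup_foldl _ _ _ _ hs
    intro s' i hs'
    exact PySem.Set.nodup_add _ _ hs'

theorem pv_nodupB (endpoint : String) : (pvVarB endpoint).Nodup := by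
  unfold pvVarB
  apply pv_nodup_foldl _ _ _ _ List.nodup_nil
  intro s up hs
  apply pv_nodup_foldl _ _ _ _ hs
  intro s' k hs'
  apply pv_nodup_foldl _ _ _ _ hs'
  intro s'' combo hs''
  exact PySem.Set.nodup_add _ _ hs''

-- ===== VERDICT (by name: the statement is the Claim_ definition above) =====
theorem char_encoding_variants_spec : Claim_equal_char_encoding_variants := by
  intro endpoint _
  unfold Spec_char_encoding_variants
  rw [pvA_eq, pvB_eq]
  apply PySem.List.sorted_eq_sorted_of_perm _ _ _ (fun a b h => h)
  refine (List.perm_ext_iff_of_nodup (pv_nodupA endpoint) (pv_nodupB endpoint)).mpr ?_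
  intro v
  rw [pv_memA, pv_memB]
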